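-- pv_equiv track=rewrite | github.com/linhdvu14/cp-sols | sols/Meta/HackerCup/2023/2023_2/B_Meta_Game.py | solve
-- ===== SOURCE A (Python) =====
-- def solve(N, A, B):
--     def ok(shift):
--         assert 0 <= shift < 2 * N
--         if shift <= N:
--             A2 = A[shift:] + B[:shift]
--             B2 = B[shift:] + A[:shift]
--         else:
--             shift -= N
--             A2 = B[shift:] + A[:shift]
--             B2 = A[shift:] + B[:shift]
--         for i in range(N):
--             if i < N // 2 and A2[i] >= B2[i]: return False
--             if i >= (N + 1) // 2 and A2[i] <= B2[i]: return False
--             if A2[i] != B2[-1 -i]: return False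
--         return True
--
--     eq = -1
--     for i, (a, b) in enumerate(zip(A, B)):
--         if a == b:
--             if eq != -1: return -1
--             eq = i
--
--     if N % 2:
--         if eq == -1: return -1
--         k = (eq - N // 2) % N
--         for shift in [k, k + N]:
--             if ok(shift):
--                 return shift
--         return -1
--
--     else:
--         if eq != -1: return -1
--
--         pivot = -1
--         for i in range(1, N):
--             if (A[i] < B[i]) != (A[i - 1] < B[i - 1]):
--                 pivot = i
--                 break
--
--         if pivot == -1:
--             k = N // 2 if A[0] < B[0] else N // 2 + N
--             return k if ok(k) else -1
--         else:
--             for i in range(pivot + 1, N):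
--                 if (A[i] < B[i]) != (A[i - 1] < B[i - 1]):
--                     return -1
--
--             if A[0] < B[0]:
--                 k = pivot - N // 2 if pivot >= N // 2 else pivot + N // 2
--                 for shift in [k, k + N]:
--                     if ok(shift):
--                         return shift
--                 return -1
--             else:
--                 k = pivot + N // 2
--                 return k if ok(k) else -1
-- ===== SOURCE B (Python) =====
-- def solve(N, A, B):
--     # View (A,B) as one circle C of length 2N (position j carries A[j] for j<N,
--     # B[j-N] otherwise).  A valid shift pairs each index against itself exactly
--     # once swapped, so the number of equal pairs must be 1 for odd N and 0 for
--     # even N -- a cheap necessary condition checked first.  The validator's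
--     # conditions become three direct scans with modular indexing into C (no
--     # slicing, no shift<=N case split), and all of the original's
--     # candidate-derivation casework is replaced by brute force over every shift
--     # 0..2N-1, returning the first valid one.
--     C = A + B
--     M = 2 * N
--     eqs = sum(a == b for a, b in zip(A, B))
--     if eqs != (1 if N % 2 else 0):
--         return -1
--
--     def valid(s):
--         return (all(C[(s + i) % M] < C[(s + i + N) % M] for i in range(N // 2))
--                 and all(C[(s + i + N) % M] < C[(s + i) % M] for i in range((N + 1) // 2, N))
--                 and all(C[(s + i) % M] == C[(s - 1 - i) % M] for i in range(N)))
--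
--     for s in range(M):
--         if valid(s):
--             return s
--     return -1
-- ===== Notes on version B (the rewrite author's own statement) =====
-- stated objective: simpler
-- what changed: B views (A,B) as one circle C = A+B of length 2N: after a cheap necessary-condition check on the number of equal pairs (1 for odd N, 0 for even N), the validator becomes three modular-index scans over C (no slicing, no shift<=N case split), and all of A's candidate-derivation casework (pivot detection, per-parity candidate formulas, second-transition check) is deleted in favour of brute-force search over shifts 0..2N-1, returning the first valid one.
-- outside the precondition, e.g. on solve(1, [5, 3], [5]): A returns 0, B returns -1; on solve(2, [0, 1, 5], [1, 0, 7]): A returns -1, B returns -1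
import Mathlib
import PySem

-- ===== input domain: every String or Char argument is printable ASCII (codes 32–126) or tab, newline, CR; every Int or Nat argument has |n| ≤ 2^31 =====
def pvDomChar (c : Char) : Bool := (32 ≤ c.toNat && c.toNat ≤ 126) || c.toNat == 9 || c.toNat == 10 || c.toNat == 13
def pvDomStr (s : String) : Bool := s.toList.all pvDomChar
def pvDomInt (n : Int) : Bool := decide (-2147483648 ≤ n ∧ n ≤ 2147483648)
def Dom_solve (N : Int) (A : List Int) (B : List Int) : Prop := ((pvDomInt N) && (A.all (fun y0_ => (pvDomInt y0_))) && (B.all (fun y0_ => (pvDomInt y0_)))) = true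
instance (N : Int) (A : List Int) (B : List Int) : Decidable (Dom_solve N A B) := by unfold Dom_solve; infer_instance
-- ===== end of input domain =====

-- B views (A,B) as one circle C = A ++ B: its validator is three modular-index
-- scans over C, and A's candidate-derivation casework is replaced by brute-force
-- search over all shifts (objective: simpler; return value only — neither
-- program mutates its arguments).

-- ===== PORT A =====
-- inner helper `ok(shift)` of A, with its slicing and shift<=N case split.
-- The `assert` never fires on the shifts A passes; list indexing is ported with
-- pyGetD, exact under Pre_ (indices in range).
def okShift (N : Int) (A B : List Int) (shift : Int) : Bool :=
  let AB : List Int × List Int :=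
    if shift ≤ N then
      (PySem.List.slice A (some shift) none ++ PySem.List.slice B none (some shift),
       PySem.List.slice B (some shift) none ++ PySem.List.slice A none (some shift))
    else
      let s := shift - N
      (PySem.List.slice B (some s) none ++ PySem.List.slice A none (some s),
       PySem.List.slice A (some s) none ++ PySem.List.slice B none (some s))
  let A2 := AB.1
  let B2 := AB.2
  (PySem.List.pyRange 0 N 1).all (fun i =>
    !(decide (i < PySem.Int.floordiv N 2) &&
      decide (PySem.List.pyGetD B2 i 0 ≤ PySem.List.pyGetD A2 i 0)) &&
    !(decide (PySem.Int.floordiv (N + 1) 2 ≤ i) &&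
      decide (PySem.List.pyGetD A2 i 0 ≤ PySem.List.pyGetD B2 i 0)) &&
    decide (PySem.List.pyGetD A2 i 0 = PySem.List.pyGetD B2 (-1 - i) 0))

-- the `for i,(a,b) in enumerate(zip(A,B))` scan with its early `return -1`
-- (none = "returned -1", some eq = fell through with final eq)
def eqLoop : List (Int × Int) → Int → Int → Option Int
  | [], _, eq => some eq
  | (a, b) :: rest, i, eq =>
    if a = b then (if eq ≠ -1 then none else eqLoop rest (i + 1) i)
    else eqLoop rest (i + 1) eq

-- `for shift in [k, k+N]: if ok(shift): return shift` / fall-through `return -1`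
def tryShifts (N : Int) (A B : List Int) : List Int → Int
  | [] => -1
  | s :: rest => if okShift N A B s then s else tryShifts N A B rest

def solve (N : Int) (A : List Int) (B : List Int) : Int :=
  match eqLoop (A.zip B) 0 (-1) with
  | none => -1
  | some eq =>
    if PySem.Int.mod N 2 ≠ 0 then
      if eq = -1 then -1
      else
        let k := PySem.Int.mod (eq - PySem.Int.floordiv N 2) N
        tryShifts N A B [k, k + N]
    else
      if eq ≠ -1 then -1
      else
        let pivot := ((PySem.List.pyRange 1 N 1).find? (fun i =>
          decide (¬ ((PySem.List.pyGetD A i 0 < PySem.List.pyGetD B i 0) ↔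
                     (PySem.List.pyGetD A (i - 1) 0 < PySem.List.pyGetD B (i - 1) 0))))).getD (-1)
        if pivot = -1 then
          let k := if PySem.List.pyGetD A 0 0 < PySem.List.pyGetD B 0 0 then
                     PySem.Int.floordiv N 2
                   else PySem.Int.floordiv N 2 + N
          if okShift N A B k then k else -1
        else
          if (PySem.List.pyRange (pivot + 1) N 1).any (fun i =>
               decide (¬ ((PySem.List.pyGetD A i 0 < PySem.List.pyGetD B i 0) ↔
                          (PySem.List.pyGetD A (i - 1) 0 < PySem.List.pyGetD B (i - 1) 0)))) then -1
          else
            if PySem.List.pyGetD A 0 0 < PySem.List.pyGetD B 0 0 then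
              let k := if pivot ≥ PySem.Int.floordiv N 2 then pivot - PySem.Int.floordiv N 2
                       else pivot + PySem.Int.floordiv N 2
              tryShifts N A B [k, k + N]
            else
              let k := pivot + PySem.Int.floordiv N 2
              if okShift N A B k then k else -1

-- ===== PORT B =====
-- Source B's `valid(s)`: three generator-expression alls over the circle C = A ++ B
-- with Python's modular indexing C[(…) % (2N)] (ported with Int.mod / pyGetD).
def validShift (N : Int) (C : List Int) (s : Int) : Bool :=
  ((PySem.List.pyRange 0 (PySem.Int.floordiv N 2) 1).all (fun i =>
      decide (PySem.List.pyGetD C (PySem.Int.mod (s + i) (2 * N)) 0 <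
              PySem.List.pyGetD C (PySem.Int.mod (s + i + N) (2 * N)) 0)) &&
   (PySem.List.pyRange (PySem.Int.floordiv (N + 1) 2) N 1).all (fun i =>
      decide (PySem.List.pyGetD C (PySem.Int.mod (s + i + N) (2 * N)) 0 <
              PySem.List.pyGetD C (PySem.Int.mod (s + i) (2 * N)) 0)) &&
   (PySem.List.pyRange 0 N 1).all (fun i =>
      decide (PySem.List.pyGetD C (PySem.Int.mod (s + i) (2 * N)) 0 =
              PySem.List.pyGetD C (PySem.Int.mod (s - 1 - i) (2 * N)) 0)))

-- `eqs = sum(a == b for a,b in zip(A,B))` (the library count of equal pairs),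
-- the necessary-condition gate, then `for s in range(2*N): if valid(s): return s`
def solve_alt (N : Int) (A : List Int) (B : List Int) : Int :=
  let eqs : Int := ((A.zip B).countP (fun p => p.1 == p.2) : Int)
  if eqs ≠ (if PySem.Int.mod N 2 ≠ 0 then 1 else 0) then -1
  else ((PySem.List.pyRange 0 (2 * N) 1).find? (fun s => validShift N (A ++ B) s)).getD (-1)

-- ===== PRECONDITION & SPEC =====
-- Pre_ is the problem's natural domain N = len(A) = len(B) ≥ 1, together with every
-- input (any lengths, any N) on which the equal-pair count of zip(A,B) already decides
-- the answer (≥ 2 equal pairs, or a count inconsistent with N's parity), where A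
-- provably returns -1.  It excludes the remaining inputs whose lengths mismatch N while
-- the count looks consistent (N odd/count 1, N even/count 0): there A runs its validator
-- over malformed slices and returns an accidental value or raises, while B's circular
-- indexing naturally raises IndexError or returns -1.
def Pre_solve (N : Int) (A : List Int) (B : List Int) : Prop :=
  ((A.length : Int) = N ∧ (B.length : Int) = N ∧ 1 ≤ N) ∨
  (2 ≤ (A.zip B).countP (fun p => p.1 == p.2)) ∨
  (N % 2 = 1 ∧ (A.zip B).countP (fun p => p.1 == p.2) = 0) ∨
  (N % 2 = 0 ∧ (A.zip B).countP (fun p => p.1 == p.2) = 1)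
instance (N : Int) (A : List Int) (B : List Int) : Decidable (Pre_solve N A B) := by
  unfold Pre_solve; infer_instance
def pvWitness_solve : Int × List Int × List Int := (2, [1, 2], [2, 1])

def Spec_solve (N : Int) (A : List Int) (B : List Int) (out : Int) : Prop := out = solve_alt N A B
instance (N : Int) (A : List Int) (B : List Int) (out : Int) : Decidable (Spec_solve N A B out) := by
  unfold Spec_solve; infer_instance

-- ===== CLAIM (what is proved, stated in full; the proofs are below) =====
def Claim_equal_solve : Prop := ∀ (N : Int) (A : List Int) (B : List Int), Dom_solve N A B → Pre_solve N A B → Spec_solve N A B (solve N A B)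

-- ===== LEMMAS AND PROOFS =====

-- proof-side helper definitions: A's brute-force shift search phrased with A's
-- validator (the bridge between the two ports), the pair okShift's shift s puts
-- at position i, and the three per-position conditions of ok
def bruteShift (N : Int) (A B : List Int) : Int :=
  ((PySem.List.pyRange 0 (2 * N) 1).find? (fun s => okShift N A B s)).getD (-1)

def pairAt (A B : List Int) (n s i : ℕ) : Int × Int :=
  if (s + i) % (2 * n) < n then (A.getD ((s + i) % n) 0, B.getD ((s + i) % n) 0)
  else (B.getD ((s + i) % n) 0, A.getD ((s + i) % n) 0)

def Cond (A B : List Int) (n s i : ℕ) : Prop :=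
  (i < n / 2 → (pairAt A B n s i).1 < (pairAt A B n s i).2) ∧
  ((n + 1) / 2 ≤ i → (pairAt A B n s i).2 < (pairAt A B n s i).1) ∧
  (pairAt A B n s i).1 = (pairAt A B n s (n - 1 - i)).2

theorem flip_half (n x : ℕ) (hn : 1 ≤ n) :
    (x + n) % (2 * n) < n ↔ ¬ (x % (2 * n) < n) := by
  have h2 : 0 < 2 * n := by omega
  have hr : x % (2 * n) < 2 * n := Nat.mod_lt _ h2
  have hx : (x + n) % (2 * n) = (x % (2 * n) + n) % (2 * n) := by
    rw [Nat.add_mod, Nat.mod_eq_of_lt (show n < 2 * n by omega)]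
  rcases lt_or_ge (x % (2 * n)) n with h | h
  · have : (x % (2 * n) + n) % (2 * n) = x % (2 * n) + n := Nat.mod_eq_of_lt (by omega)
    omega
  · have : (x % (2 * n) + n) % (2 * n) = x % (2 * n) + n - 2 * n := by
      rw [Nat.mod_eq_sub_mod (by omega), Nat.mod_eq_of_lt (by omega)]
    omega

theorem mod2n_mod_n (n x : ℕ) : x % (2 * n) % n = x % n :=
  Nat.mod_mod_of_dvd _ ⟨2, by ring⟩

theorem getD_shift (A B : List Int) (n s i : ℕ) (hA : A.length = n) (hB : B.length = n)
    (hs : s ≤ n) (hi : i < n) :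
    (A.drop s ++ B.take s).getD i 0 =
      if (s + i) % (2 * n) < n then A.getD ((s + i) % n) 0 else B.getD ((s + i) % n) 0 := by
  have hdl : (A.drop s).length = n - s := by simp [hA]
  rcases lt_or_ge i (n - s) with h | h
  · have hmod2 : (s + i) % (2 * n) = s + i := Nat.mod_eq_of_lt (by omega)
    have hmod : (s + i) % n = s + i := Nat.mod_eq_of_lt (by omega)
    rw [List.getD_append _ _ _ _ (by omega), hmod2, hmod, if_pos (by omega)]
    simp [List.getD_eq_getElem?_getD, List.getElem?_drop]
  · have hmod2 : (s + i) % (2 * n) = s + i := Nat.mod_eq_of_lt (by omega)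
    have hmod : (s + i) % n = s + i - n := by
      rw [Nat.mod_eq_sub_mod (by omega), Nat.mod_eq_of_lt (by omega)]
    rw [List.getD_append_right _ _ _ _ (by omega), hmod2, hmod, if_neg (by omega)]
    have : i - (A.drop s).length = s + i - n := by omega
    rw [this]
    simp [List.getD_eq_getElem?_getD, List.getElem?_take, (by omega : s + i - n < s)]

theorem pairAt_fst (A B : List Int) (n s i : ℕ) :
    (pairAt A B n s i).1 =
      if (s + i) % (2 * n) < n then A.getD ((s + i) % n) 0 else B.getD ((s + i) % n) 0 := by
  unfold pairAt; split <;> rfl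

theorem pairAt_snd (A B : List Int) (n s i : ℕ) :
    (pairAt A B n s i).2 =
      if (s + i) % (2 * n) < n then B.getD ((s + i) % n) 0 else A.getD ((s + i) % n) 0 := by
  unfold pairAt; split <;> rfl

theorem okBody_iff (A B : List Int) (n s : ℕ) (A2 B2 : List Int) (hn : 1 ≤ n)
    (hlB : B2.length = n)
    (hgA : ∀ j, j < n → A2.getD j 0 = (pairAt A B n s j).1)
    (hgB : ∀ j, j < n → B2.getD j 0 = (pairAt A B n s j).2) :
    ((PySem.List.pyRange 0 (n : Int) 1).all (fun i =>
      !(decide (i < PySem.Int.floordiv (n : Int) 2) &&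
        decide (PySem.List.pyGetD B2 i 0 ≤ PySem.List.pyGetD A2 i 0)) &&
      !(decide (PySem.Int.floordiv ((n : Int) + 1) 2 ≤ i) &&
        decide (PySem.List.pyGetD A2 i 0 ≤ PySem.List.pyGetD B2 i 0)) &&
      decide (PySem.List.pyGetD A2 i 0 = PySem.List.pyGetD B2 (-1 - i) 0)) = true)
    ↔ ∀ i, i < n → Cond A B n s i := by
  rw [List.all_eq_true]
  have hneg : ∀ j : ℕ, j < n → PySem.List.pyGetD B2 (-1 - (j : Int)) 0 = B2.getD (n - 1 - j) 0 := by
    intro j hj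
    have he : (-1 - (j : Int)) = -(((j + 1 : ℕ) : Int)) := by push_cast; ring
    rw [he, PySem.List.pyGetD_neg_natCast _ _ _ (by omega) (by omega)]
    rw [List.getD_eq_getElem _ _ (by omega)]
    congr 1
    omega
  have hdiv1 : PySem.Int.floordiv (n : Int) 2 = ((n / 2 : ℕ) : Int) := by
    rw [PySem.Int.floordiv_eq_ediv_of_pos (by omega)]; omega
  have hdiv2 : PySem.Int.floordiv ((n : Int) + 1) 2 = (((n + 1) / 2 : ℕ) : Int) := by
    rw [PySem.Int.floordiv_eq_ediv_of_pos (by omega)]; omega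
  constructor
  · intro h i hi
    have hm : (i : Int) ∈ PySem.List.pyRange 0 (n : Int) 1 := by
      rw [PySem.List.mem_pyRange_one]; constructor <;> omega
    have := h _ hm
    simp only [Bool.and_eq_true, Bool.not_eq_true', Bool.and_eq_false_iff,
      decide_eq_true_eq, decide_eq_false_iff_not, hdiv1, hdiv2,
      PySem.List.pyGetD_natCast, hneg i hi] at this
    obtain ⟨⟨h1, h2⟩, h3⟩ := this
    rw [hgA i hi, hgB i hi, hgB (n - 1 - i) (by omega)] at *
    refine ⟨fun hlt => ?_, fun hle => ?_, h3⟩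
    · rcases h1 with h | h
      · exact absurd (by exact_mod_cast hlt) h
      · exact lt_of_not_ge h
    · rcases h2 with h | h
      · exact absurd (by exact_mod_cast hle) h
      · exact lt_of_not_ge h
  · intro h x hx
    rw [PySem.List.mem_pyRange_one] at hx
    obtain ⟨hx0, hxn⟩ := hx
    obtain ⟨i, rfl⟩ : ∃ i : ℕ, x = (i : Int) := ⟨x.toNat, by omega⟩
    have hin : i < n := by omega
    obtain ⟨h1, h2, h3⟩ := h i hin
    simp only [Bool.and_eq_true, Bool.not_eq_true', Bool.and_eq_false_iff,
      decide_eq_true_eq, decide_eq_false_iff_not, hdiv1, hdiv2,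
      PySem.List.pyGetD_natCast, hneg i hin]
    refine ⟨⟨?_, ?_⟩, ?_⟩
    · by_cases hc : i < n / 2
      · exact Or.inr (not_le.mpr (by rw [hgA i hin, hgB i hin]; exact h1 hc))
      · exact Or.inl (by exact_mod_cast hc)
    · by_cases hc : (n + 1) / 2 ≤ i
      · exact Or.inr (not_le.mpr (by rw [hgA i hin, hgB i hin]; exact h2 hc))
      · exact Or.inl (by exact_mod_cast hc)
    · rw [hgA i hin, hgB (n - 1 - i) (by omega)]
      exact h3

theorem pairAt_swap (A B : List Int) (n s i : ℕ) :
    pairAt B A n s i = ((pairAt A B n s i).2, (pairAt A B n s i).1) := by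
  unfold pairAt; split <;> rfl

theorem getD_case1 (A B : List Int) (n s i : ℕ) (hA : A.length = n) (hB : B.length = n)
    (hs : s ≤ n) (hi : i < n) :
    (A.drop s ++ B.take s).getD i 0 = (pairAt A B n s i).1 := by
  rw [getD_shift A B n s i hA hB hs hi, pairAt_fst]

theorem getD_case2 (A B : List Int) (n s i : ℕ) (hA : A.length = n) (hB : B.length = n)
    (hs1 : n < s) (hs2 : s < 2 * n) (hi : i < n) :
    (B.drop (s - n) ++ A.take (s - n)).getD i 0 = (pairAt A B n s i).1 := by
  have hx : s - n + i + n = s + i := by omega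
  have hflip := flip_half n (s - n + i) (by omega)
  have hmodn : (s - n + i) % n = (s + i) % n := by
    rw [← hx, Nat.add_mod_right]
  rw [getD_shift B A n (s - n) i hB hA (by omega) hi, pairAt_fst, hmodn]
  rw [hx] at hflip
  split_ifs with h1 h2 h2 <;> first | rfl | (exfalso; omega) | (exfalso; tauto)

theorem ok_iff (A B : List Int) (n s : ℕ) (hA : A.length = n) (hB : B.length = n)
    (hn : 1 ≤ n) (hs : s < 2 * n) :
    okShift (n : Int) A B (s : Int) = true ↔ ∀ i, i < n → Cond A B n s i := by
  unfold okShift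
  by_cases hcase : (s : Int) ≤ (n : Int)
  · have hsn : s ≤ n := by exact_mod_cast hcase
    simp only [if_pos hcase, PySem.List.slice_from_natCast, PySem.List.slice_to_natCast]
    exact okBody_iff A B n s _ _ hn (by simp [hB, hA]; omega)
      (fun j hj => getD_case1 A B n s j hA hB hsn hj)
      (fun j hj => by
        rw [getD_case1 B A n s j hB hA hsn hj, pairAt_swap])
  · have hsn : n < s := by omega
    have hc : ((s : Int) - (n : Int)) = (((s - n : ℕ)) : Int) := by omega
    simp only [if_neg hcase, hc, PySem.List.slice_from_natCast, PySem.List.slice_to_natCast]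
    exact okBody_iff A B n s _ _ hn (by simp [hB, hA]; omega)
      (fun j hj => getD_case2 A B n s j hA hB hsn hs hj)
      (fun j hj => by
        rw [getD_case2 B A n s j hB hA hsn hs hj, pairAt_swap])

-- ===== lemmas relating B's circular validator to the same Cond characterisation =====

theorem append_getD (A B : List Int) (n u : ℕ) (hA : A.length = n) (hB : B.length = n)
    (hu : u < 2 * n) :
    (A ++ B).getD u 0 = if u < n then A.getD u 0 else B.getD (u - n) 0 := by
  by_cases h : u < n
  · rw [if_pos h, List.getD_append _ _ _ _ (by omega)]
  · rw [if_neg h, List.getD_append_right _ _ _ _ (by omega), hA]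

theorem circ_fst (A B : List Int) (n s i : ℕ) (hA : A.length = n) (hB : B.length = n)
    (hn : 1 ≤ n) :
    (A ++ B).getD ((s + i) % (2 * n)) 0 = (pairAt A B n s i).1 := by
  have hu : (s + i) % (2 * n) < 2 * n := Nat.mod_lt _ (by omega)
  rw [append_getD A B n _ hA hB hu, pairAt_fst]
  by_cases h : (s + i) % (2 * n) < n
  · have hid : (s + i) % (2 * n) = (s + i) % n := by
      rw [← mod2n_mod_n n (s + i), Nat.mod_eq_of_lt h]
    rw [if_pos h, if_pos h, hid]
  · have h1 : (s + i) % (2 * n) % n = ((s + i) % (2 * n) - n) % n :=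
      Nat.mod_eq_sub_mod (Nat.le_of_not_lt h)
    have h2 : ((s + i) % (2 * n) - n) % n = (s + i) % (2 * n) - n :=
      Nat.mod_eq_of_lt (by omega)
    have hid : (s + i) % (2 * n) - n = (s + i) % n := by
      rw [← mod2n_mod_n n (s + i), h1, h2]
    rw [if_neg h, if_neg h, hid]

theorem circ_snd (A B : List Int) (n s i : ℕ) (hA : A.length = n) (hB : B.length = n)
    (hn : 1 ≤ n) :
    (A ++ B).getD ((s + i + n) % (2 * n)) 0 = (pairAt A B n s i).2 := by
  have hu : (s + i + n) % (2 * n) < 2 * n := Nat.mod_lt _ (by omega)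
  have hflip := flip_half n (s + i) hn
  have hmodn : (s + i + n) % (2 * n) % n = (s + i) % n := by
    rw [mod2n_mod_n, Nat.add_mod_right]
  rw [append_getD A B n _ hA hB hu, pairAt_snd]
  by_cases h : (s + i) % (2 * n) < n
  · have hv : ¬ (s + i + n) % (2 * n) < n := by rw [hflip]; omega
    have h1 : (s + i + n) % (2 * n) % n = ((s + i + n) % (2 * n) - n) % n :=
      Nat.mod_eq_sub_mod (Nat.le_of_not_lt hv)
    have h2 : ((s + i + n) % (2 * n) - n) % n = (s + i + n) % (2 * n) - n :=
      Nat.mod_eq_of_lt (by omega)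
    have hid : (s + i + n) % (2 * n) - n = (s + i) % n := by
      rw [← hmodn, h1, h2]
    rw [if_neg hv, if_pos h, hid]
  · have hv : (s + i + n) % (2 * n) < n := hflip.mpr h
    have hid : (s + i + n) % (2 * n) = (s + i) % n := by
      rw [← hmodn, Nat.mod_eq_of_lt hv]
    rw [if_pos hv, if_neg h, hid]

theorem mod_int_natCast (s i n : ℕ) (hn : 1 ≤ n) :
    PySem.Int.mod ((s : Int) + (i : Int)) (2 * (n : Int)) = (((s + i) % (2 * n) : ℕ) : Int) := by
  rw [PySem.Int.mod_eq_emod_of_pos (by omega)]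
  push_cast
  rfl

theorem mod_int_natCast_mid (s i n : ℕ) (hn : 1 ≤ n) :
    PySem.Int.mod ((s : Int) + (i : Int) + (n : Int)) (2 * (n : Int)) =
      (((s + i + n) % (2 * n) : ℕ) : Int) := by
  rw [PySem.Int.mod_eq_emod_of_pos (by omega)]
  push_cast
  rfl

theorem mod_int_natCast_mirror (s i n : ℕ) (hn : 1 ≤ n) (hi : i < n) :
    PySem.Int.mod ((s : Int) - 1 - (i : Int)) (2 * (n : Int)) =
      (((s + (n - 1 - i) + n) % (2 * n) : ℕ) : Int) := by
  have e1 : s + (n - 1 - i) + n = s + 2 * n - 1 - i := by omega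
  have e2 : ((s + 2 * n - 1 - i : ℕ) : Int) = (s : Int) - 1 - (i : Int) + 2 * (n : Int) * 1 := by
    push_cast [Nat.sub_sub]
    omega
  have e3 : ((2 * n : ℕ) : Int) = 2 * (n : Int) := by push_cast; ring
  rw [PySem.Int.mod_eq_emod_of_pos (by omega), e1, Int.natCast_mod, e3, e2,
    Int.add_mul_emod_self_left]

theorem valid_iff (A B : List Int) (n s : ℕ) (hA : A.length = n) (hB : B.length = n)
    (hn : 1 ≤ n) :
    validShift (n : Int) (A ++ B) (s : Int) = true ↔ ∀ i, i < n → Cond A B n s i := by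
  have hdiv1 : PySem.Int.floordiv (n : Int) 2 = ((n / 2 : ℕ) : Int) := by
    rw [PySem.Int.floordiv_eq_ediv_of_pos (by omega)]; omega
  have hdiv2 : PySem.Int.floordiv ((n : Int) + 1) 2 = (((n + 1) / 2 : ℕ) : Int) := by
    rw [PySem.Int.floordiv_eq_ediv_of_pos (by omega)]; omega
  have hfst : ∀ i : ℕ, i < n →
      PySem.List.pyGetD (A ++ B) (PySem.Int.mod ((s : Int) + (i : Int)) (2 * (n : Int))) 0 =
        (pairAt A B n s i).1 := by
    intro i hi
    rw [mod_int_natCast s i n hn, PySem.List.pyGetD_natCast, circ_fst A B n s i hA hB hn]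
  have hsnd : ∀ i : ℕ, i < n →
      PySem.List.pyGetD (A ++ B) (PySem.Int.mod ((s : Int) + (i : Int) + (n : Int)) (2 * (n : Int))) 0 =
        (pairAt A B n s i).2 := by
    intro i hi
    rw [mod_int_natCast_mid s i n hn, PySem.List.pyGetD_natCast, circ_snd A B n s i hA hB hn]
  have hmir : ∀ i : ℕ, i < n →
      PySem.List.pyGetD (A ++ B) (PySem.Int.mod ((s : Int) - 1 - (i : Int)) (2 * (n : Int))) 0 =
        (pairAt A B n s (n - 1 - i)).2 := by
    intro i hi
    rw [mod_int_natCast_mirror s i n hn hi, PySem.List.pyGetD_natCast,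
      circ_snd A B n s (n - 1 - i) hA hB hn]
  unfold validShift
  simp only [Bool.and_eq_true, List.all_eq_true]
  constructor
  · intro ⟨⟨h1, h2⟩, h3⟩ i hi
    refine ⟨fun hlt => ?_, fun hle => ?_, ?_⟩
    · have hm : (i : Int) ∈ PySem.List.pyRange 0 (PySem.Int.floordiv (n : Int) 2) 1 := by
        rw [hdiv1, PySem.List.mem_pyRange_one]; constructor <;> omega
      have := h1 _ hm
      rw [decide_eq_true_eq, hfst i hi, hsnd i hi] at this
      exact this
    · have hm : (i : Int) ∈ PySem.List.pyRange (PySem.Int.floordiv ((n : Int) + 1) 2) (n : Int) 1 := by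
        rw [hdiv2, PySem.List.mem_pyRange_one]; constructor <;> omega
      have := h2 _ hm
      rw [decide_eq_true_eq, hfst i hi, hsnd i hi] at this
      exact this
    · have hm : (i : Int) ∈ PySem.List.pyRange 0 (n : Int) 1 := by
        rw [PySem.List.mem_pyRange_one]; constructor <;> omega
      have := h3 _ hm
      rw [decide_eq_true_eq, hfst i hi, hmir i hi] at this
      exact this
  · intro h
    refine ⟨⟨?_, ?_⟩, ?_⟩
    · intro x hx
      rw [hdiv1, PySem.List.mem_pyRange_one] at hx
      obtain ⟨i, rfl⟩ : ∃ i : ℕ, x = (i : Int) := ⟨x.toNat, by omega⟩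
      have hi : i < n := by omega
      rw [decide_eq_true_eq, hfst i hi, hsnd i hi]
      exact (h i hi).1 (by exact_mod_cast hx.2)
    · intro x hx
      rw [hdiv2, PySem.List.mem_pyRange_one] at hx
      obtain ⟨i, rfl⟩ : ∃ i : ℕ, x = (i : Int) := ⟨x.toNat, by omega⟩
      have hi : i < n := by exact_mod_cast hx.2
      rw [decide_eq_true_eq, hfst i hi, hsnd i hi]
      exact (h i hi).2.1 (by exact_mod_cast hx.1)
    · intro x hx
      rw [PySem.List.mem_pyRange_one] at hx
      obtain ⟨i, rfl⟩ : ∃ i : ℕ, x = (i : Int) := ⟨x.toNat, by omega⟩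
      have hi : i < n := by exact_mod_cast hx.2
      rw [decide_eq_true_eq, hfst i hi, hmir i hi]
      exact (h i hi).2.2

theorem find?_congr_list (l : List Int) (p q : Int → Bool)
    (h : ∀ x ∈ l, p x = q x) : l.find? p = l.find? q := by
  induction l with
  | nil => rfl
  | cons a t ih =>
    rw [List.find?_cons, List.find?_cons, h a (by simp)]
    split
    · rfl
    · exact ih (fun x hx => h x (by simp [hx]))

theorem alt_eq_brute (n : ℕ) (A B : List Int) (hA : A.length = n) (hB : B.length = n)
    (hn : 1 ≤ n)
    (hpass : (((A.zip B).countP (fun p => p.1 == p.2) : ℕ) : Int) =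
      (if PySem.Int.mod ((n : ℕ) : Int) 2 ≠ 0 then 1 else 0)) :
    solve_alt (n : Int) A B = bruteShift (n : Int) A B := by
  unfold solve_alt bruteShift
  rw [if_neg (by simp [hpass])]
  have h := find?_congr_list (PySem.List.pyRange 0 (2 * (n : Int)) 1)
    (fun s => validShift (n : Int) (A ++ B) s) (fun s => okShift (n : Int) A B s)
    (fun x hx => by
    rw [PySem.List.mem_pyRange_one] at hx
    obtain ⟨s, rfl⟩ : ∃ s : ℕ, x = (s : Int) := ⟨x.toNat, by omega⟩
    have hs : s < 2 * n := by
      have := hx.2; push_cast at this; omega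
    rw [Bool.eq_iff_iff, valid_iff A B n s hA hB hn, ok_iff A B n s hA hB hn hs])
  rw [h]

-- ===== lemmas about A's control flow (eq scan, candidate search) =====

theorem eqLoop_some_pos (l : List (Int × Int)) : ∀ (i acc : Int), acc ≠ -1 →
    ∀ r, eqLoop l i acc = some r → r = acc ∧ ∀ k, (hk : k < l.length) → l[k].1 ≠ l[k].2 := by
  induction l with
  | nil => intro i acc hacc r h; simp [eqLoop] at h; exact ⟨h.symm, by intro k hk; simp at hk⟩
  | cons ab rest ih =>
    intro i acc hacc r h
    obtain ⟨a, b⟩ := ab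
    by_cases hab : a = b
    · simp [eqLoop, hab, hacc] at h
    · rw [eqLoop, if_neg hab] at h
      obtain ⟨hr, hrest⟩ := ih (i + 1) acc hacc r h
      refine ⟨hr, ?_⟩
      intro k hk
      cases k with
      | zero => simpa using hab
      | succ k' => simpa using hrest k' (by simpa using hk)

theorem eqLoop_none_pos (l : List (Int × Int)) : ∀ (i acc : Int), acc ≠ -1 →
    eqLoop l i acc = none → ∃ k, ∃ hk : k < l.length, l[k].1 = l[k].2 := by
  induction l with
  | nil => intro i acc hacc h; simp [eqLoop] at h
  | cons ab rest ih =>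
    intro i acc hacc h
    obtain ⟨a, b⟩ := ab
    by_cases hab : a = b
    · exact ⟨0, by simp, by simpa using hab⟩
    · rw [eqLoop, if_neg hab] at h
      obtain ⟨k, hk, hkk⟩ := ih (i + 1) acc hacc h
      exact ⟨k + 1, by simpa using hk, by simpa using hkk⟩

theorem eqLoop_some_neg1 (l : List (Int × Int)) : ∀ (i : Int), 0 ≤ i →
    ∀ r, eqLoop l i (-1) = some r →
    (r = -1 ∧ ∀ k, (hk : k < l.length) → l[k].1 ≠ l[k].2) ∨
    (∃ k, ∃ hk : k < l.length, r = i + k ∧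
      ∀ k', (hk' : k' < l.length) → (l[k'].1 = l[k'].2 ↔ k' = k)) := by
  induction l with
  | nil =>
    intro i hi r h
    simp [eqLoop] at h
    exact Or.inl ⟨h.symm, by intro k hk; simp at hk⟩
  | cons ab rest ih =>
    intro i hi r h
    obtain ⟨a, b⟩ := ab
    by_cases hab : a = b
    · rw [eqLoop, if_pos hab, if_neg (by simp)] at h
      obtain ⟨hr, hrest⟩ := eqLoop_some_pos rest (i + 1) i (by omega) r h
      refine Or.inr ⟨0, by simp, by simpa using hr, ?_⟩
      intro k' hk'
      cases k' with
      | zero => simpa using hab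
      | succ k'' =>
        have hne := hrest k'' (by simpa using hk')
        simp only [List.getElem_cons_succ]
        exact ⟨fun hc => absurd hc hne, fun hc => absurd hc (by omega)⟩
    · rw [eqLoop, if_neg hab] at h
      rcases ih (i + 1) (by omega) r h with ⟨hr, hrest⟩ | ⟨k, hk, hr, huniq⟩
      · refine Or.inl ⟨hr, ?_⟩
        intro k hk
        cases k with
        | zero => simpa using hab
        | succ k' => simpa using hrest k' (by simpa using hk)
      · refine Or.inr ⟨k + 1, by simpa using hk, by push_cast at hr ⊢; omega, ?_⟩
        intro k' hk'
        cases k' with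
        | zero => simp [hab]
        | succ k'' =>
          have := huniq k'' (by simpa using hk')
          simpa using this

theorem eqLoop_none_neg1 (l : List (Int × Int)) : ∀ (i : Int), 0 ≤ i →
    eqLoop l i (-1) = none →
    ∃ k1 k2, ∃ h1 : k1 < l.length, ∃ h2 : k2 < l.length,
      k1 ≠ k2 ∧ l[k1].1 = l[k1].2 ∧ l[k2].1 = l[k2].2 := by
  induction l with
  | nil => intro i hi h; simp [eqLoop] at h
  | cons ab rest ih =>
    intro i hi h
    obtain ⟨a, b⟩ := ab
    by_cases hab : a = b
    · rw [eqLoop, if_pos hab, if_neg (by simp)] at h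
      obtain ⟨k, hk, hkk⟩ := eqLoop_none_pos rest (i + 1) i (by omega) h
      exact ⟨0, k + 1, by simp, by simpa using hk, by omega, by simpa using hab, by simpa using hkk⟩
    · rw [eqLoop, if_neg hab] at h
      obtain ⟨k1, k2, h1, h2, hne, he1, he2⟩ := ih (i + 1) (by omega) h
      exact ⟨k1 + 1, k2 + 1, by simpa using h1, by simpa using h2, by omega,
        by simpa using he1, by simpa using he2⟩

theorem find?_pyRange_none (p : Int → Bool) (a b : Int)
    (h : ∀ s : Int, a ≤ s → s < b → p s = false) :
    (PySem.List.pyRange a b 1).find? p = none := by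
  rw [List.find?_eq_none]
  intro x hx
  rw [PySem.List.mem_pyRange_one] at hx
  simp [h x hx.1 hx.2]

theorem alt_of_none (N : Int) (A B : List Int)
    (h : ∀ s : Int, 0 ≤ s → s < 2 * N → okShift N A B s = false) :
    bruteShift N A B = -1 := by
  unfold bruteShift
  rw [find?_pyRange_none _ _ _ h]
  rfl

theorem alt_of_one (N : Int) (A B : List Int) (k : Int) (hk0 : 0 ≤ k) (hk2 : k < 2 * N)
    (h : ∀ s : Int, 0 ≤ s → s < 2 * N → okShift N A B s = true → s = k) :
    bruteShift N A B = if okShift N A B k then k else -1 := by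
  unfold bruteShift
  rw [PySem.List.pyRange_one_append 0 k (2 * N) hk0 (by omega),
    PySem.List.pyRange_one_cons (a := k) (b := 2 * N) (by omega), List.find?_append,
    List.find?_cons]
  rw [find?_pyRange_none _ _ _ (fun s hs1 hs2 => by
    by_cases hb : okShift N A B s = true
    · exact absurd (h s (by omega) (by omega) hb) (by omega)
    · simpa using hb)]
  by_cases hk : okShift N A B k = true
  · simp [hk]
  · rw [find?_pyRange_none _ _ _ (fun s hs1 hs2 => by
      by_cases hb : okShift N A B s = true
      · exact absurd (h s (by omega) hs2 hb) (by omega)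
      · simpa using hb)]
    simp [hk]

theorem alt_of_two (N : Int) (A B : List Int) (k : Int) (hk0 : 0 ≤ k) (hk2 : k < N)
    (h : ∀ s : Int, 0 ≤ s → s < 2 * N → okShift N A B s = true → s = k ∨ s = k + N) :
    bruteShift N A B =
      (if okShift N A B k then k else if okShift N A B (k + N) then k + N else -1) := by
  unfold bruteShift
  rw [PySem.List.pyRange_one_append 0 k (2 * N) hk0 (by omega),
    PySem.List.pyRange_one_cons (a := k) (b := 2 * N) (by omega), List.find?_append,
    List.find?_cons]
  rw [find?_pyRange_none _ _ _ (fun s hs1 hs2 => by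
    by_cases hb : okShift N A B s = true
    · rcases h s (by omega) (by omega) hb with h' | h' <;> omega
    · simpa using hb)]
  by_cases hk : okShift N A B k = true
  · simp [hk]
  · rw [PySem.List.pyRange_one_append (k + 1) (k + N) (2 * N) (by omega) (by omega),
      PySem.List.pyRange_one_cons (a := k + N) (b := 2 * N) (by omega), List.find?_append,
      List.find?_cons]
    rw [find?_pyRange_none _ _ _ (fun s hs1 hs2 => by
      by_cases hb : okShift N A B s = true
      · rcases h s (by omega) (by omega) hb with h' | h' <;> omega
      · simpa using hb)]
    by_cases hk2' : okShift N A B (k + N) = true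
    · simp [hk, hk2']
    · rw [find?_pyRange_none _ _ _ (fun s hs1 hs2 => by
        by_cases hb : okShift N A B s = true
        · rcases h s (by omega) hs2 hb with h' | h' <;> simp_all
        · simpa using hb)]
      simp [hk, hk2']

theorem tryShifts_pair (N : Int) (A B : List Int) (k1 k2 : Int) :
    tryShifts N A B [k1, k2] =
      (if okShift N A B k1 then k1 else if okShift N A B k2 then k2 else -1) := by
  simp [tryShifts]

theorem mod_eq_of_shift (n x y : ℕ) (hy : y < n) (h : x = y ∨ x = y + n ∨ x = y + 2 * n) :
    x % n = y := by
  rcases h with rfl | rfl | rfl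
  · exact Nat.mod_eq_of_lt hy
  · rw [Nat.add_mod_right]; exact Nat.mod_eq_of_lt hy
  · rw [show y + 2 * n = y + n + n by ring, Nat.add_mod_right, Nat.add_mod_right]
    exact Nat.mod_eq_of_lt hy

theorem keyn (n s j : ℕ) (hn : 1 ≤ n) (hs : s < 2 * n) (hj : j < n) :
    (s + (j + 2 * n - s) % n) % n = j := by
  obtain ⟨q, hq, hd⟩ : ∃ q, q < 3 ∧ j + 2 * n - s = n * q + (j + 2 * n - s) % n :=
    ⟨(j + 2 * n - s) / n, Nat.div_lt_of_lt_mul (by omega), (Nat.div_add_mod _ n).symm⟩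
  rcases (by omega : q = 0 ∨ q = 1 ∨ q = 2) with rfl | rfl | rfl <;>
    exact mod_eq_of_shift n _ j hj (by omega)

theorem key2n (n s j : ℕ) (hn : 1 ≤ n) (hs : s < 2 * n) (hj : j < 2 * n) :
    (s + (j + 2 * n - s) % (2 * n)) % (2 * n) = j := by
  obtain ⟨q, hq, hd⟩ : ∃ q, q < 2 ∧ j + 2 * n - s = 2 * n * q + (j + 2 * n - s) % (2 * n) :=
    ⟨(j + 2 * n - s) / (2 * n), Nat.div_lt_of_lt_mul (by omega), (Nat.div_add_mod _ _).symm⟩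
  rcases (by omega : q = 0 ∨ q = 1) with rfl | rfl
  · exact mod_eq_of_shift (2 * n) _ j hj (by omega)
  · exact mod_eq_of_shift (2 * n) _ j hj (by omega)

theorem mod_inj3 (n a b s y : ℕ) (hn : 1 ≤ n) (ha : a < n) (hb : b < n) (hs : s < 2 * n)
    (h1 : (a + 2 * n - s) % n = y) (h2 : (b + 2 * n - s) % n = y) : a = b := by
  obtain ⟨q1, hq1, hd1⟩ : ∃ q, q < 3 ∧ a + 2 * n - s = n * q + y :=
    ⟨(a + 2 * n - s) / n, Nat.div_lt_of_lt_mul (by omega), by rw [← h1]; exact (Nat.div_add_mod _ n).symm⟩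
  obtain ⟨q2, hq2, hd2⟩ : ∃ q, q < 3 ∧ b + 2 * n - s = n * q + y :=
    ⟨(b + 2 * n - s) / n, Nat.div_lt_of_lt_mul (by omega), by rw [← h2]; exact (Nat.div_add_mod _ n).symm⟩
  rcases (by omega : q1 = 0 ∨ q1 = 1 ∨ q1 = 2) with rfl | rfl | rfl <;>
    rcases (by omega : q2 = 0 ∨ q2 = 1 ∨ q2 = 2) with rfl | rfl | rfl <;> omega

theorem s_values (n s y : ℕ) (hn : 1 ≤ n) (hs : s < 2 * n) (h : s % n = y) :
    s = y ∨ s = y + n := by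
  obtain ⟨q, hq, hd⟩ : ∃ q, q < 2 ∧ s = n * q + y :=
    ⟨s / n, Nat.div_lt_of_lt_mul (by omega), by rw [← h]; exact (Nat.div_add_mod _ n).symm⟩
  rcases (by omega : q = 0 ∨ q = 1) with rfl | rfl <;> omega

theorem s_mod_of (n s p y : ℕ) (hn : 1 ≤ n) (hs : s < 2 * n) (hp : p < n) (hy : y < n)
    (h : (p + 2 * n - s) % n = y) : s % n = (p + 2 * n - y) % n := by
  obtain ⟨q, hq, hd⟩ : ∃ q, q < 3 ∧ p + 2 * n - s = n * q + y :=
    ⟨(p + 2 * n - s) / n, Nat.div_lt_of_lt_mul (by omega), by rw [← h]; exact (Nat.div_add_mod _ n).symm⟩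
  have hsm : s % n < n := Nat.mod_lt _ (by omega)
  obtain ⟨d, hd2, hds⟩ : ∃ d, d < 2 ∧ s = n * d + s % n :=
    ⟨s / n, Nat.div_lt_of_lt_mul (by omega), (Nat.div_add_mod _ n).symm⟩
  symm
  apply mod_eq_of_shift n _ _ hsm
  rcases (by omega : q = 0 ∨ q = 1 ∨ q = 2) with rfl | rfl | rfl <;>
    rcases (by omega : d = 0 ∨ d = 1) with rfl | rfl <;> omega

theorem offset_idx (n s y : ℕ) (hn : 1 ≤ n) (hs : s < 2 * n) (hy : y < n) :
    ((s + y) % n + 2 * n - s) % n = y := by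
  obtain ⟨q, hq, hd⟩ : ∃ q, q < 3 ∧ s + y = n * q + (s + y) % n :=
    ⟨(s + y) / n, Nat.div_lt_of_lt_mul (by omega), (Nat.div_add_mod _ n).symm⟩
  have hm : (s + y) % n < n := Nat.mod_lt _ (by omega)
  apply mod_eq_of_shift n _ _ hy
  rcases (by omega : q = 0 ∨ q = 1 ∨ q = 2) with rfl | rfl | rfl <;> omega

theorem pairAt_eq_iff (A B : List Int) (n s i : ℕ) :
    (pairAt A B n s i).1 = (pairAt A B n s i).2 ↔
      A.getD ((s + i) % n) 0 = B.getD ((s + i) % n) 0 := by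
  unfold pairAt; split
  · rfl
  · exact eq_comm

theorem cond_eq_imp (A B : List Int) (n s : ℕ) (hn : 1 ≤ n) (hs : s < 2 * n)
    (hok : ∀ i, i < n → Cond A B n s i) (j : ℕ) (hj : j < n)
    (heq : A.getD j 0 = B.getD j 0) : n % 2 = 1 ∧ (j + 2 * n - s) % n = n / 2 := by
  set i := (j + 2 * n - s) % n with hidef
  have hin : i < n := Nat.mod_lt _ (by omega)
  have hji : (s + i) % n = j := keyn n s j hn hs hj
  obtain ⟨h1, h2, _⟩ := hok i hin
  have he : (pairAt A B n s i).1 = (pairAt A B n s i).2 :=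
    (pairAt_eq_iff A B n s i).mpr (by rw [hji]; exact heq)
  have hn1 : ¬ i < n / 2 := fun hc => absurd (he ▸ h1 hc) (lt_irrefl _)
  have hn2 : ¬ (n + 1) / 2 ≤ i := fun hc => absurd (he ▸ h2 hc) (lt_irrefl _)
  omega

theorem cond_mid (A B : List Int) (n s : ℕ) (hn : 1 ≤ n) (hodd : n % 2 = 1)
    (hok : ∀ i, i < n → Cond A B n s i) :
    A.getD ((s + n / 2) % n) 0 = B.getD ((s + n / 2) % n) 0 := by
  obtain ⟨_, _, h3⟩ := hok (n / 2) (by omega)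
  have hmid : n - 1 - n / 2 = n / 2 := by omega
  rw [hmid] at h3
  exact (pairAt_eq_iff A B n s (n / 2)).mp h3

theorem unshift (n y j : ℕ) (hn : 1 ≤ n) (hj : j < n) (hy : y < 4 * n)
    (h : (y + n) % (2 * n) = j) : y % (2 * n) = j + n := by
  obtain ⟨q, hq, hd⟩ : ∃ q, q < 3 ∧ y + n = 2 * n * q + j :=
    ⟨(y + n) / (2 * n), Nat.div_lt_of_lt_mul (by omega), by
      rw [← h]; exact (Nat.div_add_mod _ _).symm⟩
  apply mod_eq_of_shift (2 * n) _ _ (by omega)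
  rcases (by omega : q = 0 ∨ q = 1 ∨ q = 2) with rfl | rfl | rfl <;> omega

theorem cond_cval (A B : List Int) (n s : ℕ) (hn2 : 2 ≤ n) (heven : n % 2 = 0)
    (hs : s < 2 * n) (hok : ∀ i, i < n → Cond A B n s i) (j : ℕ) (hj : j < n) :
    (A.getD j 0 < B.getD j 0) ↔
      ((j + 2 * n - s) % (2 * n) < n / 2 ∨ n + n / 2 ≤ (j + 2 * n - s) % (2 * n)) := by
  set u := (j + 2 * n - s) % (2 * n) with hudef
  have hu2 : u < 2 * n := Nat.mod_lt _ (by omega)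
  have hhalf : (n + 1) / 2 = n / 2 := by omega
  by_cases hun : u < n
  · have ht : (s + u) % (2 * n) = j := key2n n s j (by omega) hs (by omega)
    have htn : (s + u) % n = j := by
      rw [← mod2n_mod_n n (s + u), ht, Nat.mod_eq_of_lt hj]
    obtain ⟨h1, h2, _⟩ := hok u hun
    rw [pairAt_fst, pairAt_snd, ht, htn] at h1 h2
    simp only [if_pos hj] at h1 h2
    constructor
    · intro hAB
      by_contra hnot
      push Not at hnot
      exact absurd hAB (lt_asymm (h2 (by omega)))
    · intro hor
      rcases hor with hor | hor
      · exact h1 hor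
      · omega
  · have ht0 : (s + u) % (2 * n) = j := key2n n s j (by omega) hs (by omega)
    have hyrw : s + (u - n) + n = s + u := by omega
    have hy : (s + (u - n)) % (2 * n) = j + n := by
      apply unshift n (s + (u - n)) j (by omega) hj (by omega)
      rw [hyrw]; exact ht0
    have hyn : (s + (u - n)) % n = j := by
      rw [← mod2n_mod_n n (s + (u - n)), hy]
      exact mod_eq_of_shift n _ _ hj (by omega)
    obtain ⟨h1, h2, _⟩ := hok (u - n) (by omega)
    rw [pairAt_fst, pairAt_snd, hy, hyn] at h1 h2
    simp only [if_neg (show ¬ j + n < n by omega)] at h1 h2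
    constructor
    · intro hAB
      right
      by_contra hnot
      exact absurd hAB (lt_asymm (h1 (by omega)))
    · intro hor
      rcases hor with hor | hor
      · omega
      · exact h2 (by omega)

theorem cond_trans (A B : List Int) (n s : ℕ) (hn2 : 2 ≤ n) (heven : n % 2 = 0)
    (hs : s < 2 * n) (hok : ∀ i, i < n → Cond A B n s i) (j : ℕ) (hj1 : 1 ≤ j) (hj : j < n) :
    ((A.getD j 0 < B.getD j 0) ↔ (A.getD (j - 1) 0 < B.getD (j - 1) 0)) ↔
      (j + 2 * n - s) % n ≠ n / 2 := by
  have hcj := cond_cval A B n s hn2 heven hs hok j hj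
  have hcj' := cond_cval A B n s hn2 heven hs hok (j - 1) (by omega)
  set u := (j + 2 * n - s) % (2 * n) with hudef
  set v := (j - 1 + 2 * n - s) % (2 * n) with hvdef
  have hu2 : u < 2 * n := Nat.mod_lt _ (by omega)
  have hv2 : v < 2 * n := Nat.mod_lt _ (by omega)
  have hvu : u = (v + 1) % (2 * n) := by
    rw [hvdef, Nat.mod_add_mod, hudef]
    congr 1
    omega
  have hrel : (u = v + 1 ∧ v + 1 < 2 * n) ∨ (v = 2 * n - 1 ∧ u = 0) := by
    by_cases h : v + 1 < 2 * n
    · exact Or.inl ⟨by rw [hvu, Nat.mod_eq_of_lt h], h⟩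
    · refine Or.inr ⟨by omega, ?_⟩
      rw [hvu, show v + 1 = 2 * n by omega, Nat.mod_self]
  have humod : (j + 2 * n - s) % n = u % n := (mod2n_mod_n n _).symm
  have humv : (u < n ∧ u % n = u) ∨ (n ≤ u ∧ u % n = u - n) := by
    by_cases h : u < n
    · exact Or.inl ⟨h, Nat.mod_eq_of_lt h⟩
    · exact Or.inr ⟨by omega, mod_eq_of_shift n u (u - n) (by omega) (by omega)⟩
  rw [hcj, hcj', humod]
  rcases humv with ⟨hun, h⟩ | ⟨hnu, h⟩ <;> rw [h] <;> omega

theorem sol_from_mid (n s k0 : ℕ) (hn : 1 ≤ n) (hs : s < 2 * n) (hk : k0 < n)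
    (h : (s + n / 2) % n = k0) : s % n = (k0 + n - n / 2) % n := by
  obtain ⟨q, hq, hd⟩ : ∃ q, q < 3 ∧ s + n / 2 = n * q + k0 :=
    ⟨(s + n / 2) / n, Nat.div_lt_of_lt_mul (by omega), by rw [← h]; exact (Nat.div_add_mod _ n).symm⟩
  have hsm : s % n < n := Nat.mod_lt _ (by omega)
  obtain ⟨d, hd2, hds⟩ : ∃ d, d < 2 ∧ s = n * d + s % n :=
    ⟨s / n, Nat.div_lt_of_lt_mul (by omega), (Nat.div_add_mod _ n).symm⟩
  symm
  apply mod_eq_of_shift n _ _ hsm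
  rcases (by omega : q = 0 ∨ q = 1 ∨ q = 2) with rfl | rfl | rfl <;>
    rcases (by omega : d = 0 ∨ d = 1) with rfl | rfl <;> omega

theorem solve_eq_brute : ∀ (N : Int) (A B : List Int),
    (A.length : Int) = N → (B.length : Int) = N → 1 ≤ N →
    solve N A B = bruteShift N A B := by
  intro N A B hA' hB' hN1
  obtain ⟨n, rfl⟩ : ∃ n : ℕ, N = (n : ℤ) := ⟨N.toNat, by omega⟩
  have hA : A.length = n := by exact_mod_cast hA'
  have hB : B.length = n := by exact_mod_cast hB'
  have hn : 1 ≤ n := by exact_mod_cast hN1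
  clear hA' hB' hN1
  have hzl : (A.zip B).length = n := by simp [List.length_zip, hA, hB]
  have hz1 : ∀ k, (hk : k < (A.zip B).length) → (A.zip B)[k].1 = A.getD k 0 := by
    intro k hk
    rw [List.getElem_zip, List.getD_eq_getElem _ _ (by omega)]
  have hz2 : ∀ k, (hk : k < (A.zip B).length) → (A.zip B)[k].2 = B.getD k 0 := by
    intro k hk
    rw [List.getElem_zip, List.getD_eq_getElem _ _ (by omega)]
  have hOK : ∀ s : ℕ, s < 2 * n →
      (okShift (n : Int) A B (s : Int) = true ↔ ∀ i, i < n → Cond A B n s i) :=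
    fun s hs => ok_iff A B n s hA hB hn hs
  have hm2 : PySem.Int.mod (n : Int) 2 = ((n % 2 : ℕ) : Int) := by
    rw [PySem.Int.mod_eq_emod_of_pos (by omega)]; omega
  have hdiv : PySem.Int.floordiv (n : Int) 2 = ((n / 2 : ℕ) : Int) := by
    rw [PySem.Int.floordiv_eq_ediv_of_pos (by omega)]; omega
  cases heqL : eqLoop (A.zip B) 0 (-1) with
  | none =>
    obtain ⟨k1, k2, h1, h2, hne, he1, he2⟩ := eqLoop_none_neg1 (A.zip B) 0 (le_refl 0) heqL
    rw [hz1 k1 h1, hz2 k1 h1] at he1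
    rw [hz1 k2 h2, hz2 k2 h2] at he2
    have halt : bruteShift (n : Int) A B = -1 := by
      apply alt_of_none
      intro s hs0 hs2
      by_contra hokb
      rw [Bool.not_eq_false] at hokb
      obtain ⟨s', rfl⟩ : ∃ s' : ℕ, s = (s' : ℤ) := ⟨s.toNat, by omega⟩
      have hs' : s' < 2 * n := by push_cast at hs2; omega
      have hok := (hOK s' hs').mp hokb
      have c1 := cond_eq_imp A B n s' hn hs' hok k1 (by omega) he1
      have c2 := cond_eq_imp A B n s' hn hs' hok k2 (by omega) he2
      exact hne (mod_inj3 n k1 k2 s' (n / 2) hn (by omega) (by omega) hs' c1.2 c2.2)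
    unfold solve
    rw [heqL, halt]
  | some eqv =>
    rcases eqLoop_some_neg1 (A.zip B) 0 (le_refl 0) eqv heqL with ⟨rfl, hnoeq⟩ | ⟨k0, hk0, heqv, huniq⟩
    · -- fell through with eq = -1 : no equal index anywhere
      have hnoeqD : ∀ j, j < n → A.getD j 0 ≠ B.getD j 0 := fun j hj => by
        have := hnoeq j (by omega)
        rwa [hz1 j (by omega), hz2 j (by omega)] at this
      simp only [solve, heqL]
      by_cases hpar : n % 2 = 1
      · have hc : ¬ PySem.Int.mod ((n : ℕ) : ℤ) 2 = 0 := by rw [hm2]; omega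
        rw [if_pos hc]
        simp only [if_true]
        symm
        apply alt_of_none
        intro s hs0 hs2
        by_contra hokb
        rw [Bool.not_eq_false] at hokb
        obtain ⟨s', rfl⟩ : ∃ s' : ℕ, s = (s' : ℤ) := ⟨s.toNat, by omega⟩
        have hs' : s' < 2 * n := by push_cast at hs2; omega
        have hok := (hOK s' hs').mp hokb
        exact hnoeqD ((s' + n / 2) % n) (Nat.mod_lt _ (by omega))
          (cond_mid A B n s' hn hpar hok)
      · have heven : n % 2 = 0 := by omega
        have hc : ¬ ¬ PySem.Int.mod ((n : ℕ) : ℤ) 2 = 0 := by rw [hm2]; omega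
        rw [if_neg hc]
        simp only [ne_eq, not_true_eq_false, if_false, not_false_eq_true]
        have hn2 : 2 ≤ n := by omega
        rw [PySem.List.pyGetD_zero A, PySem.List.pyGetD_zero B]
        cases hfind : List.find? (fun i : ℤ =>
            decide ¬(PySem.List.pyGetD A i 0 < PySem.List.pyGetD B i 0 ↔
              PySem.List.pyGetD A (i - 1) 0 < PySem.List.pyGetD B (i - 1) 0))
            (PySem.List.pyRange 1 ((n : ℕ) : ℤ)) with
        | none =>
          simp only [Option.getD_none, eq_self_iff_true, if_true]
          have hnotr : ∀ j : ℕ, 1 ≤ j → j < n →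
              ((A.getD j 0 < B.getD j 0) ↔ (A.getD (j - 1) 0 < B.getD (j - 1) 0)) := by
            intro j hj1 hjn
            have hmem : (j : ℤ) ∈ PySem.List.pyRange 1 ((n : ℕ) : ℤ) := by
              rw [PySem.List.mem_pyRange_one]; omega
            have hq := List.find?_eq_none.mp hfind _ hmem
            have hcast : ((j : ℤ) - 1) = ((j - 1 : ℕ) : ℤ) := by omega
            simp only [hcast, PySem.List.pyGetD_natCast, decide_eq_true_eq, not_not] at hq
            exact hq
          have hforce : ∀ s' : ℕ, s' < 2 * n → (∀ i, i < n → Cond A B n s' i) →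
              s' % n = n / 2 := by
            intro s' hs' hok
            by_contra hne
            have hj0n : (s' + n / 2) % n < n := Nat.mod_lt _ (by omega)
            have hoff : ((s' + n / 2) % n + 2 * n - s') % n = n / 2 :=
              offset_idx n s' (n / 2) hn hs' (by omega)
            have hj01 : 1 ≤ (s' + n / 2) % n := by
              rcases Nat.eq_zero_or_pos ((s' + n / 2) % n) with h0 | h0
              · exfalso
                have := s_mod_of n s' ((s' + n / 2) % n) (n / 2) hn hs' hj0n (by omega) hoff
                rw [h0] at this
                have hv : (0 + 2 * n - n / 2) % n = n / 2 :=
                  mod_eq_of_shift n _ _ (by omega) (by omega)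
                omega
              · omega
            exact ((cond_trans A B n s' hn2 heven hs' hok _ hj01 hj0n).mp
              (hnotr _ hj01 hj0n)) hoff
          by_cases hc0 : A.getD 0 0 < B.getD 0 0
          · simp only [if_pos hc0]
            rw [hdiv]
            have key : ∀ s : ℤ, 0 ≤ s → s < 2 * ((n : ℕ) : ℤ) →
                okShift ((n : ℕ) : ℤ) A B s = true → s = ((n / 2 : ℕ) : ℤ) := by
              intro s hs0 hs2 hokb
              obtain ⟨s', rfl⟩ : ∃ s' : ℕ, s = (s' : ℤ) := ⟨s.toNat, by omega⟩
              have hs' : s' < 2 * n := by omega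
              have hok := (hOK s' hs').mp hokb
              rcases s_values n s' (n / 2) hn hs' (hforce s' hs' hok) with rfl | rfl
              · rfl
              · exfalso
                have hcv := cond_cval A B n (n / 2 + n) hn2 heven hs' hok 0 (by omega)
                rw [Nat.mod_eq_of_lt (by omega)] at hcv
                have := hcv.mp hc0
                omega
            rw [alt_of_one ((n : ℕ) : ℤ) A B _ (by omega) (by push_cast; omega) key]
          · simp only [if_neg hc0]
            rw [hdiv]
            have key : ∀ s : ℤ, 0 ≤ s → s < 2 * ((n : ℕ) : ℤ) →
                okShift ((n : ℕ) : ℤ) A B s = true →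
                s = ((n / 2 : ℕ) : ℤ) + ((n : ℕ) : ℤ) := by
              intro s hs0 hs2 hokb
              obtain ⟨s', rfl⟩ : ∃ s' : ℕ, s = (s' : ℤ) := ⟨s.toNat, by omega⟩
              have hs' : s' < 2 * n := by omega
              have hok := (hOK s' hs').mp hokb
              rcases s_values n s' (n / 2) hn hs' (hforce s' hs' hok) with rfl | rfl
              · exfalso
                have hcv := cond_cval A B n (n / 2) hn2 heven hs' hok 0 (by omega)
                rw [Nat.mod_eq_of_lt (by omega)] at hcv
                exact hc0 (hcv.mpr (by omega))
              · push_cast; ring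
            rw [alt_of_one ((n : ℕ) : ℤ) A B _ (by omega) (by push_cast; omega) key]
        | some p =>
          have hmem := List.mem_of_find?_eq_some hfind
          rw [PySem.List.mem_pyRange_one] at hmem
          obtain ⟨pn, rfl⟩ : ∃ pn : ℕ, p = (pn : ℤ) := ⟨p.toNat, by omega⟩
          have hp1 : 1 ≤ pn := by exact_mod_cast hmem.1
          have hpn : pn < n := by exact_mod_cast hmem.2
          have hptrans : ¬((A.getD pn 0 < B.getD pn 0) ↔
              (A.getD (pn - 1) 0 < B.getD (pn - 1) 0)) := by
            have hq := List.find?_some hfind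
            have hcast : ((pn : ℤ) - 1) = ((pn - 1 : ℕ) : ℤ) := by omega
            simp only [hcast, PySem.List.pyGetD_natCast, decide_eq_true_eq] at hq
            exact hq
          simp only [Option.getD_some]
          rw [if_neg (by omega : ¬ ((pn : ℤ) = -1))]
          cases hany : (PySem.List.pyRange ((pn : ℤ) + 1) ((n : ℕ) : ℤ)).any (fun i : ℤ =>
              decide ¬(PySem.List.pyGetD A i 0 < PySem.List.pyGetD B i 0 ↔
                PySem.List.pyGetD A (i - 1) 0 < PySem.List.pyGetD B (i - 1) 0)) with
          | true =>
            rw [if_pos rfl]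
            obtain ⟨x, hxmem, hxP⟩ := List.any_eq_true.mp hany
            rw [PySem.List.mem_pyRange_one] at hxmem
            obtain ⟨j2, rfl⟩ : ∃ j2 : ℕ, x = (j2 : ℤ) := ⟨x.toNat, by omega⟩
            have hj2a : pn + 1 ≤ j2 := by exact_mod_cast hxmem.1
            have hj2b : j2 < n := by exact_mod_cast hxmem.2
            have hj2t : ¬((A.getD j2 0 < B.getD j2 0) ↔
                (A.getD (j2 - 1) 0 < B.getD (j2 - 1) 0)) := by
              have hcast : ((j2 : ℤ) - 1) = ((j2 - 1 : ℕ) : ℤ) := by omega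
              simp only [hcast, PySem.List.pyGetD_natCast, decide_eq_true_eq] at hxP
              exact hxP
            symm
            apply alt_of_none
            intro s hs0 hs2
            by_contra hokb
            rw [Bool.not_eq_false] at hokb
            obtain ⟨s', rfl⟩ : ∃ s' : ℕ, s = (s' : ℤ) := ⟨s.toNat, by omega⟩
            have hs' : s' < 2 * n := by omega
            have hok := (hOK s' hs').mp hokb
            have e1 : (pn + 2 * n - s') % n = n / 2 := not_not.mp
              (mt (cond_trans A B n s' hn2 heven hs' hok pn hp1 hpn).mpr hptrans)
            have e2 : (j2 + 2 * n - s') % n = n / 2 := not_not.mp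
              (mt (cond_trans A B n s' hn2 heven hs' hok j2 (by omega) hj2b).mpr hj2t)
            have := mod_inj3 n pn j2 s' (n / 2) hn hpn hj2b hs' e1 e2
            omega
          | false =>
            rw [if_neg (by simp)]
            have hcore : ∀ s' : ℕ, s' < 2 * n → (∀ i, i < n → Cond A B n s' i) →
                s' % n = (pn + 2 * n - n / 2) % n := by
              intro s' hs' hok
              have e1 : (pn + 2 * n - s') % n = n / 2 := not_not.mp
                (mt (cond_trans A B n s' hn2 heven hs' hok pn hp1 hpn).mpr hptrans)
              exact s_mod_of n s' pn (n / 2) hn hs' hpn (by omega) e1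
            by_cases hc0 : A.getD 0 0 < B.getD 0 0
            · simp only [if_pos hc0]
              rw [hdiv]
              set knat := if n / 2 ≤ pn then pn - n / 2 else pn + n / 2 with hkn
              have hknn : knat < n := by rw [hkn]; split_ifs <;> omega
              have hmval : (pn + 2 * n - n / 2) % n = knat := by
                rw [hkn]; split_ifs with hge <;>
                  exact mod_eq_of_shift n _ _ (by omega) (by omega)
              have hkcast : (if ((pn : ℤ) ≥ ((n / 2 : ℕ) : ℤ)) then (pn : ℤ) - ((n / 2 : ℕ) : ℤ)
                  else (pn : ℤ) + ((n / 2 : ℕ) : ℤ)) = (knat : ℤ) := by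
                rw [hkn]; split_ifs with h1 h2 h2 <;> omega
              rw [hkcast, tryShifts_pair]
              have hcand : ∀ s : ℤ, 0 ≤ s → s < 2 * ((n : ℕ) : ℤ) →
                  okShift ((n : ℕ) : ℤ) A B s = true →
                  s = (knat : ℤ) ∨ s = (knat : ℤ) + ((n : ℕ) : ℤ) := by
                intro s hs0 hs2 hokb
                obtain ⟨s', rfl⟩ : ∃ s' : ℕ, s = (s' : ℤ) := ⟨s.toNat, by omega⟩
                have hs' : s' < 2 * n := by omega
                have hok := (hOK s' hs').mp hokb
                rcases s_values n s' knat hn hs' (by rw [hcore s' hs' hok, hmval]) with rfl | rfl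
                · left; rfl
                · right; push_cast; ring
              rw [alt_of_two ((n : ℕ) : ℤ) A B (knat : ℤ) (by omega) (by exact_mod_cast hknn) hcand]
            · simp only [if_neg hc0]
              rw [hdiv]
              have key : ∀ s : ℤ, 0 ≤ s → s < 2 * ((n : ℕ) : ℤ) →
                  okShift ((n : ℕ) : ℤ) A B s = true →
                  s = (pn : ℤ) + ((n / 2 : ℕ) : ℤ) := by
                intro s hs0 hs2 hokb
                obtain ⟨s', rfl⟩ : ∃ s' : ℕ, s = (s' : ℤ) := ⟨s.toNat, by omega⟩
                have hs' : s' < 2 * n := by omega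
                have hok := (hOK s' hs').mp hokb
                have hsm := hcore s' hs' hok
                have hmv : (pn + n / 2 < n ∧ (pn + 2 * n - n / 2) % n = pn + n / 2) ∨
                    (n ≤ pn + n / 2 ∧ (pn + 2 * n - n / 2) % n = pn + n / 2 - n) := by
                  by_cases hlt : pn + n / 2 < n
                  · exact Or.inl ⟨hlt, mod_eq_of_shift n _ _ (by omega) (by omega)⟩
                  · exact Or.inr ⟨by omega, mod_eq_of_shift n _ _ (by omega) (by omega)⟩
                rcases hmv with ⟨h1, h2⟩ | ⟨h1, h2⟩ <;>
                  rcases s_values n s' _ hn hs' (by rw [hsm, h2]) with rfl | rfl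
                · push_cast; omega
                · exfalso
                  have hcv := cond_cval A B n _ hn2 heven hs' hok 0 (by omega)
                  rw [Nat.mod_eq_of_lt (by omega)] at hcv
                  exact absurd (hcv.mpr (Or.inl (by omega))) hc0
                · exfalso
                  by_cases hz : pn + n / 2 = n
                  · have hcv := cond_cval A B n _ hn2 heven hs' hok 0 (by omega)
                    rw [show 0 + 2 * n - (pn + n / 2 - n) = 2 * n from by omega,
                      Nat.mod_self] at hcv
                    exact absurd (hcv.mpr (Or.inl (by omega))) hc0
                  · have hcv := cond_cval A B n _ hn2 heven hs' hok 0 (by omega)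
                    rw [Nat.mod_eq_of_lt (by omega)] at hcv
                    exact absurd (hcv.mpr (Or.inr (by omega))) hc0
                · push_cast; omega
              rw [alt_of_one ((n : ℕ) : ℤ) A B _ (by omega) (by push_cast; omega) key]
    · -- unique equal index k0
      have hk0n : k0 < n := by omega
      have huniqD : ∀ j, j < n → (A.getD j 0 = B.getD j 0 ↔ j = k0) := fun j hj => by
        have := huniq j (by omega)
        rwa [hz1 j (by omega), hz2 j (by omega)] at this
      subst heqv
      simp only [solve, heqL]
      by_cases hpar : n % 2 = 1
      · have hc : ¬ PySem.Int.mod ((n : ℕ) : ℤ) 2 = 0 := by rw [hm2]; omega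
        rw [if_pos hc, if_neg (by omega : ¬ ((0 : ℤ) + (k0 : ℤ) = -1))]
        set knat := (k0 + n - n / 2) % n with hknat
        have hknn : knat < n := Nat.mod_lt _ (by omega)
        have hkval : PySem.Int.mod ((0 : ℤ) + (k0 : ℤ) - PySem.Int.floordiv ((n : ℕ) : ℤ) 2) ((n : ℕ) : ℤ) = (knat : ℤ) := by
          rw [hdiv, PySem.Int.mod_eq_emod_of_pos (by omega)]
          have h1 : ((0 : ℤ) + (k0 : ℤ) - ((n / 2 : ℕ) : ℤ)) = ((k0 + n - n / 2 : ℕ) : ℤ) - ((n : ℕ) : ℤ) := by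
            omega
          rw [h1, Int.sub_emod_right, hknat, Int.natCast_mod]
        rw [hkval, tryShifts_pair]
        have hcand : ∀ s : ℤ, 0 ≤ s → s < 2 * ((n : ℕ) : ℤ) → okShift ((n : ℕ) : ℤ) A B s = true →
            s = (knat : ℤ) ∨ s = (knat : ℤ) + ((n : ℕ) : ℤ) := by
          intro s hs0 hs2 hokb
          obtain ⟨s', rfl⟩ : ∃ s' : ℕ, s = (s' : ℤ) := ⟨s.toNat, by omega⟩
          have hs' : s' < 2 * n := by omega
          have hok := (hOK s' hs').mp hokb
          have hmidv := cond_mid A B n s' hn hpar hok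
          have hjm : (s' + n / 2) % n = k0 :=
            (huniqD _ (Nat.mod_lt _ (by omega))).mp hmidv
          have hsm := sol_from_mid n s' k0 hn hs' hk0n hjm
          rcases s_values n s' knat hn hs' (by rw [hsm, hknat]) with rfl | rfl
          · left; rfl
          · right; push_cast; ring
        rw [alt_of_two ((n : ℕ) : ℤ) A B (knat : ℤ) (by omega) (by exact_mod_cast hknn) hcand]
      · have heven : n % 2 = 0 := by omega
        have hc : ¬ ¬ PySem.Int.mod ((n : ℕ) : ℤ) 2 = 0 := by rw [hm2]; omega
        rw [if_neg hc, if_pos (by omega : ((0 : ℤ) + (k0 : ℤ) ≠ -1))]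
        symm
        apply alt_of_none
        intro s hs0 hs2
        by_contra hokb
        rw [Bool.not_eq_false] at hokb
        obtain ⟨s', rfl⟩ : ∃ s' : ℕ, s = (s' : ℤ) := ⟨s.toNat, by omega⟩
        have hs' : s' < 2 * n := by push_cast at hs2; omega
        have hok := (hOK s' hs').mp hokb
        have := cond_eq_imp A B n s' hn hs' hok k0 hk0n ((huniqD k0 hk0n).mpr rfl)
        omega

theorem countP_zero_of_none (l : List (Int × Int))
    (h : ∀ k, (hk : k < l.length) → l[k].1 ≠ l[k].2) :
    l.countP (fun p => p.1 == p.2) = 0 := by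
  rw [List.countP_eq_zero]
  intro a ha
  obtain ⟨k, hk, rfl⟩ := List.mem_iff_getElem.mp ha
  simpa using h k hk

theorem countP_one_of_unique (l : List (Int × Int)) : ∀ (k0 : ℕ), (hk0 : k0 < l.length) →
    (∀ k, (hk : k < l.length) → (l[k].1 = l[k].2 ↔ k = k0)) →
    l.countP (fun p => p.1 == p.2) = 1 := by
  induction l with
  | nil => intro k0 hk0 _; simp at hk0
  | cons x t ih =>
    intro k0 hk0 h
    cases k0 with
    | zero =>
      have hx : x.1 = x.2 := by simpa using (h 0 (by simp)).mpr rfl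
      rw [List.countP_cons_of_pos (p := fun p : Int × Int => p.1 == p.2) (a := x) (l := t) (by simpa using hx)]
      have h0 : t.countP (fun p => p.1 == p.2) = 0 := by
        apply countP_zero_of_none
        intro k hk hc
        have := (h (k + 1) (by simpa using hk)).mp (by simpa using hc)
        omega
      omega
    | succ k' =>
      have hx : ¬ x.1 = x.2 := fun hc => by
        have := (h 0 (by simp)).mp (by simpa using hc)
        omega
      rw [List.countP_cons_of_neg (p := fun p : Int × Int => p.1 == p.2) (a := x) (l := t) (by simpa using hx)]
      apply ih k' (by simpa using hk0)
      intro k hk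
      have := h (k + 1) (by simpa using hk)
      simp only [List.getElem_cons_succ] at this
      rw [this]
      omega

-- if the equal-pair count is inconsistent with N's parity, no shift validates
theorem brute_bad_count (n : ℕ) (A B : List Int) (hA : A.length = n) (hB : B.length = n)
    (hn : 1 ≤ n)
    (hbad : (n % 2 = 1 ∧ (A.zip B).countP (fun p => p.1 == p.2) ≠ 1) ∨
            (n % 2 = 0 ∧ (A.zip B).countP (fun p => p.1 == p.2) ≠ 0)) :
    bruteShift ((n : ℕ) : Int) A B = -1 := by
  have hzl : (A.zip B).length = n := by simp [List.length_zip, hA, hB]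
  have hz1 : ∀ k, (hk : k < (A.zip B).length) → (A.zip B)[k].1 = A.getD k 0 := by
    intro k hk
    rw [List.getElem_zip, List.getD_eq_getElem _ _ (by omega)]
  have hz2 : ∀ k, (hk : k < (A.zip B).length) → (A.zip B)[k].2 = B.getD k 0 := by
    intro k hk
    rw [List.getElem_zip, List.getD_eq_getElem _ _ (by omega)]
  apply alt_of_none
  intro s hs0 hs2
  by_contra hokb
  rw [Bool.not_eq_false] at hokb
  obtain ⟨s', rfl⟩ : ∃ s' : ℕ, s = (s' : ℤ) := ⟨s.toNat, by omega⟩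
  have hs' : s' < 2 * n := by push_cast at hs2; omega
  have hok := (ok_iff A B n s' hA hB hn hs').mp hokb
  rcases hbad with ⟨hodd, hc1⟩ | ⟨heven, hc0⟩
  · -- odd n: a valid shift forces exactly one equal pair
    set j0 := (s' + n / 2) % n with hj0def
    have hj0n : j0 < n := Nat.mod_lt _ (by omega)
    have hj0eq : A.getD j0 0 = B.getD j0 0 := cond_mid A B n s' hn hodd hok
    have hoff : (j0 + 2 * n - s') % n = n / 2 := offset_idx n s' (n / 2) hn hs' (by omega)
    have hcnt1 : (A.zip B).countP (fun p => p.1 == p.2) = 1 := by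
      apply countP_one_of_unique _ j0 (by omega)
      intro k hk
      rw [hz1 k hk, hz2 k hk]
      constructor
      · intro hkeq
        have := cond_eq_imp A B n s' hn hs' hok k (by omega) hkeq
        exact mod_inj3 n k j0 s' (n / 2) hn (by omega) hj0n hs' this.2 hoff
      · intro hkj; subst hkj; exact hj0eq
    exact hc1 hcnt1
  · -- even n: a valid shift forbids any equal pair
    have hcnt0 : (A.zip B).countP (fun p => p.1 == p.2) = 0 := by
      apply countP_zero_of_none
      intro k hk hkeq
      rw [hz1 k hk, hz2 k hk] at hkeq
      have := cond_eq_imp A B n s' hn hs' hok k (by omega) hkeq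
      omega
    exact hc0 hcnt0

-- on every input where the equal-pair count already decides the answer, both
-- programs return -1 (any N, any lengths)
theorem gate_neg1 (N : Int) (A B : List Int)
    (h : 2 ≤ (A.zip B).countP (fun p => p.1 == p.2) ∨
         (N % 2 = 1 ∧ (A.zip B).countP (fun p => p.1 == p.2) = 0) ∨
         (N % 2 = 0 ∧ (A.zip B).countP (fun p => p.1 == p.2) = 1)) :
    solve N A B = -1 ∧ solve_alt N A B = -1 := by
  have hm2 : PySem.Int.mod N 2 = N % 2 := PySem.Int.mod_eq_emod_of_pos (by omega)
  have hmod : N % 2 = 0 ∨ N % 2 = 1 := by omega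
  constructor
  · cases heqL : eqLoop (A.zip B) 0 (-1) with
    | none => simp only [solve, heqL]
    | some e =>
      rcases eqLoop_some_neg1 (A.zip B) 0 (le_refl 0) e heqL with ⟨rfl, hnone⟩ | ⟨k0, hk0, heqv, huniq⟩
      · have hcnt : (A.zip B).countP (fun p => p.1 == p.2) = 0 := countP_zero_of_none _ hnone
        have hodd : N % 2 = 1 := by rcases h with h | ⟨h, _⟩ | ⟨_, h⟩ <;> omega
        simp only [solve, heqL]
        rw [if_pos (by rw [hm2]; omega)]
        simp only [if_true]
      · have hcnt : (A.zip B).countP (fun p => p.1 == p.2) = 1 :=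
          countP_one_of_unique _ k0 hk0 huniq
        have heven : N % 2 = 0 := by rcases h with h | ⟨_, h⟩ | ⟨h, _⟩ <;> omega
        subst heqv
        simp only [solve, heqL]
        rw [if_neg (by rw [hm2]; omega), if_pos (by omega : ((0 : ℤ) + (k0 : ℤ) ≠ -1))]
  · have hcond : (((A.zip B).countP (fun p => p.1 == p.2) : ℕ) : Int) ≠
        (if PySem.Int.mod N 2 ≠ 0 then 1 else 0) := by
      rw [hm2]
      rcases h with h | ⟨h1, h2⟩ | ⟨h1, h2⟩
      · by_cases hp : N % 2 = 0
        · rw [if_neg (by simp [hp])]; omega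
        · rw [if_pos hp]; omega
      · rw [if_pos (by omega)]; omega
      · rw [if_neg (by simp [h1])]; omega
    unfold solve_alt
    rw [if_pos hcond]

-- ===== VERDICT (by name: the statement is the Claim_ definition above) =====
theorem solve_spec : Claim_equal_solve := by
  unfold Claim_equal_solve
  intro N A B _ hPre
  unfold Spec_solve
  rcases hPre with ⟨h1, h2, h3⟩ | hgate
  · obtain ⟨n, rfl⟩ : ∃ n : ℕ, N = (n : ℤ) := ⟨N.toNat, by omega⟩
    have hA : A.length = n := by exact_mod_cast h1
    have hB : B.length = n := by exact_mod_cast h2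
    have hn : 1 ≤ n := by exact_mod_cast h3
    by_cases hbad : (n % 2 = 1 ∧ (A.zip B).countP (fun p => p.1 == p.2) ≠ 1) ∨
        (n % 2 = 0 ∧ (A.zip B).countP (fun p => p.1 == p.2) ≠ 0)
    · have hAv : solve ((n : ℕ) : ℤ) A B = -1 :=
        (solve_eq_brute _ A B h1 h2 h3).trans (brute_bad_count n A B hA hB hn hbad)
      have hBv : solve_alt ((n : ℕ) : ℤ) A B = -1 := by
        refine (gate_neg1 ((n : ℕ) : ℤ) A B ?_).2
        rcases hbad with ⟨hp, hc⟩ | ⟨hp, hc⟩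
        · rcases Nat.lt_or_ge ((A.zip B).countP (fun p => p.1 == p.2)) 2 with h | h
          · exact Or.inr (Or.inl ⟨by omega, by omega⟩)
          · exact Or.inl h
        · rcases Nat.lt_or_ge ((A.zip B).countP (fun p => p.1 == p.2)) 2 with h | h
          · exact Or.inr (Or.inr ⟨by omega, by omega⟩)
          · exact Or.inl h
      rw [hAv, hBv]
    · have hpass : (((A.zip B).countP (fun p => p.1 == p.2) : ℕ) : Int) =
          (if PySem.Int.mod ((n : ℕ) : Int) 2 ≠ 0 then 1 else 0) := by
        have hm2 : PySem.Int.mod ((n : ℕ) : ℤ) 2 = ((n % 2 : ℕ) : ℤ) := by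
          rw [PySem.Int.mod_eq_emod_of_pos (by omega)]; omega
        rw [hm2]
        rcases (by omega : n % 2 = 0 ∨ n % 2 = 1) with hp | hp
        · have hc : (A.zip B).countP (fun p => p.1 == p.2) = 0 := by
            by_contra hcc; exact hbad (Or.inr ⟨hp, hcc⟩)
          simp [hp, hc]
        · have hc : (A.zip B).countP (fun p => p.1 == p.2) = 1 := by
            by_contra hcc; exact hbad (Or.inl ⟨hp, hcc⟩)
          simp [hp, hc]
      rw [solve_eq_brute _ A B h1 h2 h3, alt_eq_brute n A B hA hB hn hpass]
  · obtain ⟨hAv, hBv⟩ := gate_neg1 N A B hgate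
    rw [hAv, hBv]
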